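-- pv_equiv track=rewrite | github.com/em3rch/prg-basics | 05-MockTest/p3.py | f
-- ===== SOURCE A (Python) =====
-- def f(name):
--     name_lst: list = name.split()
--     result_str: str = ""
--
--     for i in name_lst:
--         if i[0].isalpha():
--             result_str += i[0]
--         else:
--             continue
--
--     return result_str
-- ===== SOURCE B (Python) =====
-- def f(name):
--     result = []
--     in_word = False
--     for c in name:
--         if c.isspace():
--             in_word = False
--         elif not in_word:
--             in_word = True
--             if c.isalpha():
--                 result.append(c)
--     return "".join(result)
-- ===== Notes on version B (the rewrite author's own statement) =====
-- stated objective: alternative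
-- what changed: Replaces split()-then-index-each-word with a single character scan using an in_word flag that detects word starts, building no intermediate word list.
import Mathlib
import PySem

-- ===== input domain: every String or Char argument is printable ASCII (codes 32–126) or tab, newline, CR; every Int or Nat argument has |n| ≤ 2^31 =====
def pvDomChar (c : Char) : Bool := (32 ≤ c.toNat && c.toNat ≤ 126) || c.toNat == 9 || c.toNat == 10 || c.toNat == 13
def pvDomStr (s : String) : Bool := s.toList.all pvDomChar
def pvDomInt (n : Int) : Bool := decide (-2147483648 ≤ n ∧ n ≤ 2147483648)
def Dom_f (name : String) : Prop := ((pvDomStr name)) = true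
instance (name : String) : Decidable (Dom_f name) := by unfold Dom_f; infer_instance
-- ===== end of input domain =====

-- B replaces split()-plus-word-indexing with a single character scan carrying an in_word flag; same output, no intermediate word list.

-- ===== PORT A =====
-- one step of A's 'for i in name_lst' loop: i[0] via pyGet? (words from split() are nonempty, so the none branch is unreachable)
def fStepA (acc : List Char) (w : List Char) : List Char :=
  match PySem.List.pyGet? w 0 with
  | some c => if PySem.Chars.isalpha c then acc ++ [c] else acc
  | none => acc

def f (name : String) : String :=
  String.ofList ((PySem.Chars.split₀ name.toList).foldl fStepA [])

-- ===== PORT B =====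
-- one step of B's character loop; state = (result chars, in_word flag)
def fStepB (st : List Char × Bool) (c : Char) : List Char × Bool :=
  if PySem.Chars.isspace c then (st.1, false)
  else if st.2 then st
  else (if PySem.Chars.isalpha c then st.1 ++ [c] else st.1, true)

def f_alt (name : String) : String :=
  String.ofList ((name.toList.foldl fStepB ([], false)).1)

-- ===== PRECONDITION & SPEC =====
def Spec_f (name : String) (out : String) : Prop := out = f_alt name
instance (name : String) (out : String) : Decidable (Spec_f name out) := by unfold Spec_f; infer_instance

-- ===== CLAIM (what is proved, stated in full; the proofs are below) =====
def Claim_equal_f : Prop := ∀ (name : String), Dom_f name → Spec_f name (f name)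

-- ===== LEMMAS AND PROOFS =====

-- the common specification: initials of cs, with flag b = "currently inside a word"
def specF : List Char → Bool → List Char
  | [], _ => []
  | c :: rest, b =>
    if PySem.Chars.isspace c then specF rest false
    else if b then specF rest true
    else (if PySem.Chars.isalpha c then [c] else []) ++ specF rest true

-- initial of a single word
def ini (w : List Char) : List Char :=
  match PySem.List.pyGet? w 0 with
  | some c => if PySem.Chars.isalpha c then [c] else []
  | none => []

lemma foldl_stepA (ws : List (List Char)) : ∀ r, ws.foldl fStepA r = r ++ ws.flatMap ini := by
  induction ws with
  | nil => intro r; simp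
  | cons w ws ih =>
    intro r
    simp only [List.foldl_cons, List.flatMap_cons, ih]
    cases hw : PySem.List.pyGet? w 0 with
    | none => simp [fStepA, ini, hw]
    | some c => by_cases h : PySem.Chars.isalpha c <;> simp [fStepA, ini, hw, h]

lemma foldl_stepB (cs : List Char) : ∀ r b, (cs.foldl fStepB (r, b)).1 = r ++ specF cs b := by
  induction cs with
  | nil => intro r b; simp [specF]
  | cons c cs ih =>
    intro r b
    by_cases hs : PySem.Chars.isspace c
    · simp [fStepB, hs, ih, specF]
    · cases b with
      | true => simp [fStepB, hs, ih, specF]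
      | false =>
        by_cases ha : PySem.Chars.isalpha c <;>
          simp [fStepB, hs, ha, ih, specF]

-- pending-word contribution: cur is the reversed current word inside split₀.go
def pend (w : List Char) (cs : List Char) : List Char :=
  match w with
  | [] => specF cs false
  | c :: _ => (if PySem.Chars.isalpha c then [c] else []) ++ specF cs true

lemma ini_cons (a : Char) (t : List Char) :
    ini (a :: t) = if PySem.Chars.isalpha a then [a] else [] := by
  simp [ini, PySem.List.pyGet?, PySem.List.pyIdx?]

lemma go_flatMap (cs : List Char) : ∀ cur acc,
    (PySem.Chars.split₀.go cs cur acc).flatMap ini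
      = acc.reverse.flatMap ini ++ pend cur.reverse cs := by
  induction cs with
  | nil =>
    intro cur acc
    rw [PySem.Chars.split₀.go]
    cases h : cur.isEmpty
    · have hc : cur ≠ [] := by simpa [List.isEmpty_iff] using h
      cases hr : cur.reverse with
      | nil => exact absurd (by simpa using hr) hc
      | cons a t =>
        simp [pend, specF, ini_cons]
    · have hc : cur = [] := by simpa [List.isEmpty_iff] using h
      simp [hc, pend, specF]
  | cons c rest ih =>
    intro cur acc
    rw [PySem.Chars.split₀.go]
    by_cases hs : PySem.Chars.isspace c
    · simp only [hs, if_true]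
      cases h : cur.isEmpty
      · have hc : cur ≠ [] := by simpa [List.isEmpty_iff] using h
        cases hr : cur.reverse with
        | nil => exact absurd (by simpa using hr) hc
        | cons a t =>
          simp [ih, pend, specF, hs, ini_cons]
      · have hc : cur = [] := by simpa [List.isEmpty_iff] using h
        simp [hc, ih, pend, specF, hs]
    · simp only [hs, Bool.false_eq_true, if_false, ih]
      cases hr : cur.reverse with
      | nil =>
        have hc : cur = [] := by simpa using hr
        simp [hc, pend, specF, hs]
      | cons a t =>
        simp [pend, specF, hs, List.reverse_cons, hr]

-- ===== VERDICT (by name: the statement is the Claim_ definition above) =====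
theorem f_spec : Claim_equal_f := by
  intro name _
  show f name = f_alt name
  unfold f f_alt PySem.Chars.split₀
  rw [foldl_stepA, go_flatMap, foldl_stepB]
  simp [pend]
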